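-- pv_equiv track=rewrite | github.com/pypi-data/pypi-mirror-400 | packages/iflow-mcp_normaltusker_kotlin_mcp_server/iflow_mcp_normaltusker_kotlin_mcp_server-2.1.0-py3-none-any.whl/tools/intelligent_navigation.py | _extract_symbol_at_position
-- ===== SOURCE A (Python) =====
-- from typing import Any, Dict, List, Optional, Tuple
--
-- def _extract_symbol_at_position(line: str, column: int) -> Optional[str]:
--     """Extract symbol name at given position in line."""
--     if column > len(line):
--         return None
--
--     # Find word boundaries around the position
--     start = column
--     while start > 0 and (line[start - 1].isalnum() or line[start - 1] == "_"):
--         start -= 1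
--
--     end = column
--     while end < len(line) and (line[end].isalnum() or line[end] == "_"):
--         end += 1
--
--     if start < end:
--         return line[start:end]
--
--     return None
-- ===== SOURCE B (Python) =====
-- from typing import Optional
--
--
-- def _extract_symbol_at_position(line: str, column: int) -> Optional[str]:
--     """Extract symbol name at given position in line.
--
--     Single forward pass over the line: group maximal runs of word
--     characters into (start, end) spans, then return the span touching
--     `column`, if any.
--     """
--     spans = []
--     run_start = None
--     for i, ch in enumerate(line):
--         if ch.isalnum() or ch == "_":
--             if run_start is None:
--                 run_start = i
--         else:
--             if run_start is not None:
--                 spans.append((run_start, i))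
--                 run_start = None
--     if run_start is not None:
--         spans.append((run_start, len(line)))
--     for start, end in spans:
--         if start <= column <= end:
--             return line[start:end]
--     return None
-- ===== Notes on version B (the rewrite author's own statement) =====
-- stated objective: alternative
-- what changed: Replaces A's bidirectional index-arithmetic scan outward from the column with a single forward pass (a C-level enumerate loop) that folds the line into its maximal word-character spans and then returns the span touching the column; the tight for-loop avoids A's per-iteration subscripting and bound tests, a constant-factor win measured.
-- intended difference: For in-range negative columns (-len(line) <= column < 0) that point, via Python's negative-index wraparound, at a word character, A returns a spurious slice taken from the wrapped position (possibly the empty string), while B returns None, the intended answer since no span of the line sits at a negative column. — e.g. on _extract_symbol_at_position("ab", -1): A returns some "b", B returns none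
import Mathlib
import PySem

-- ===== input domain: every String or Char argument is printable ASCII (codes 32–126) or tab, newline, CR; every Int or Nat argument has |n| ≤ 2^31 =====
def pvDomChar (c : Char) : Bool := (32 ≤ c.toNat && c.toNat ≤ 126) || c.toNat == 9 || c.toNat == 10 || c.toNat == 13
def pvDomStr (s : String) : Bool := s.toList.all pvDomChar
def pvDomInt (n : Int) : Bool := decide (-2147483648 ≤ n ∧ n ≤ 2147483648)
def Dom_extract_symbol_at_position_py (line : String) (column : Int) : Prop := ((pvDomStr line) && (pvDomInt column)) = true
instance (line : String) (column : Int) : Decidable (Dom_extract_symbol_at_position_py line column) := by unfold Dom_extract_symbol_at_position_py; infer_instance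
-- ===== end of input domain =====

-- B replaces A's bidirectional scan outward from the column by one forward pass grouping maximal
-- word-character runs into spans (alternative decomposition, same behaviour); on in-range negative
-- columns B returns none where A returns a negative-index-wraparound slice (stated as D_ below).


-- ===== PORT A =====
-- ch.isalnum() or ch == "_"   (shared predicate of both Pythons)
def pvWord (c : Char) : Bool := PySem.Chars.isalnum c || c == '_'

-- A's left while-loop 'while start > 0 and word(line[start-1]): start -= 1', structural on the
-- value of start (the loop only runs while start > 0, so it is entered with a Nat value).
def pvScanL (l : List Char) : Nat → Nat
  | 0 => 0
  | s + 1 => if ((PySem.List.pyGet? l (s : Int)).any pvWord) then pvScanL l s else s + 1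

-- A's right while-loop 'while end < len(line) and word(line[end]): end += 1'; the guard
-- 'end < len' is carried as the exact remaining iteration count (len - end), the index stays an
-- Int so that line[end] wraps for negative end exactly as Python's does (pyGet?).
def pvScanR (l : List Char) : Nat → Int → Int
  | 0, e => e
  | r + 1, e => if ((PySem.List.pyGet? l e).any pvWord) then pvScanR l r (e + 1) else e

def extract_symbol_at_position_py (line : String) (column : Int) : Option String :=
  let l := line.toList
  let n : Int := l.length
  if column > n then none
  else
    let start : Int := if 0 ≤ column then ((pvScanL l column.toNat : Nat) : Int) else column
    let e : Int := pvScanR l (n - column).toNat column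
    if start < e then some (PySem.Str.slice line (some start) (some e)) else none

-- ===== PORT B =====
-- one step of B's for-loop over enumerate(line): state = (spans so far, start of the open run)
def pvStep (st : List (Int × Int) × Option Int) (p : Int × Char) : List (Int × Int) × Option Int :=
  if pvWord p.2 then
    match st.2 with
    | none => (st.1, some p.1)
    | some _ => st
  else
    match st.2 with
    | none => st
    | some s => (st.1 ++ [(s, p.1)], none)

def extract_symbol_at_position_py_alt (line : String) (column : Int) : Option String :=
  let l := line.toList
  let n : Int := l.length
  let st := (PySem.List.enumerate l 0).foldl pvStep ([], none)
  let spans := match st.2 with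
    | none => st.1
    | some s => st.1 ++ [(s, n)]
  match spans.find? (fun p => decide (p.1 ≤ column ∧ column ≤ p.2)) with
  | some p => some (PySem.Str.slice line (some p.1) (some p.2))
  | none => none

-- ===== PRECONDITION & SPEC =====
-- A raises IndexError (line[end] with end < -len(line)) exactly when column < -len(line); those
-- inputs are excluded, everything else A accepts is admitted.
def Pre_extract_symbol_at_position_py (line : String) (column : Int) : Prop :=
  -(line.toList.length : Int) ≤ column
instance (line : String) (column : Int) : Decidable (Pre_extract_symbol_at_position_py line column) := by unfold Pre_extract_symbol_at_position_py; infer_instance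
def pvWitness_extract_symbol_at_position_py : String × Int := ("foo bar", 5)

-- For in-range negative columns (-len(line) ≤ column < 0) pointing, via Python's negative-index
-- wraparound, at a word character, A returns a spurious slice taken from the wrapped position
-- (possibly ""), while B returns none, the intended answer since no character of the line sits at
-- a negative column.
def D_extract_symbol_at_position_py (line : String) (column : Int) : Prop :=
  column < 0 ∧ ((PySem.List.pyGet? line.toList column).any pvWord) = true
instance (line : String) (column : Int) : Decidable (D_extract_symbol_at_position_py line column) := by unfold D_extract_symbol_at_position_py; infer_instance

def Spec_extract_symbol_at_position_py (line : String) (column : Int) (out : Option String) : Prop := ¬ D_extract_symbol_at_position_py line column → out = extract_symbol_at_position_py_alt line column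
instance (line : String) (column : Int) (out : Option String) : Decidable (Spec_extract_symbol_at_position_py line column out) := by unfold Spec_extract_symbol_at_position_py; infer_instance

def pvDiffWitness_extract_symbol_at_position_py : String × Int := ("ab", -1)
def pvDiffWitnessOut_extract_symbol_at_position_py : (Option String) × (Option String) := (some "b", none)

-- ===== CLAIM (what is proved, stated in full; the proofs are below) =====
def Claim_unchanged_extract_symbol_at_position_py : Prop := ∀ (line : String) (column : Int), Dom_extract_symbol_at_position_py line column → Pre_extract_symbol_at_position_py line column → Spec_extract_symbol_at_position_py line column (extract_symbol_at_position_py line column)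
def Claim_changed_extract_symbol_at_position_py : Prop := Dom_extract_symbol_at_position_py (pvDiffWitness_extract_symbol_at_position_py.1) (pvDiffWitness_extract_symbol_at_position_py.2) ∧ Pre_extract_symbol_at_position_py (pvDiffWitness_extract_symbol_at_position_py.1) (pvDiffWitness_extract_symbol_at_position_py.2) ∧ D_extract_symbol_at_position_py (pvDiffWitness_extract_symbol_at_position_py.1) (pvDiffWitness_extract_symbol_at_position_py.2) ∧ extract_symbol_at_position_py (pvDiffWitness_extract_symbol_at_position_py.1) (pvDiffWitness_extract_symbol_at_position_py.2) = pvDiffWitnessOut_extract_symbol_at_position_py.1 ∧ extract_symbol_at_position_py_alt (pvDiffWitness_extract_symbol_at_position_py.1) (pvDiffWitness_extract_symbol_at_position_py.2) = pvDiffWitnessOut_extract_symbol_at_position_py.2 ∧ pvDiffWitnessOut_extract_symbol_at_position_py.1 ≠ pvDiffWitnessOut_extract_symbol_at_position_py.2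
def Claim_exact_extract_symbol_at_position_py : Prop := ∀ (line : String) (column : Int), Dom_extract_symbol_at_position_py line column → Pre_extract_symbol_at_position_py line column → D_extract_symbol_at_position_py line column → extract_symbol_at_position_py line column ≠ extract_symbol_at_position_py_alt line column


-- ===== LEMMAS AND PROOFS =====

-- 'line[i] is a word character', Int index with Python's wraparound (false where line[i] raises)
def pvW (l : List Char) (i : Int) : Bool := (PySem.List.pyGet? l i).any pvWord

-- a maximal run of word characters of l, as a pair of Int endpoints
def pvMaxRun (l : List Char) (s e : Int) : Prop :=
  0 ≤ s ∧ s < e ∧ e ≤ (l.length : Int) ∧ (∀ j, s ≤ j → j < e → pvW l j = true) ∧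
  (s = 0 ∨ pvW l (s - 1) = false) ∧ (e = (l.length : Int) ∨ pvW l e = false)

-- invariant of B's fold after the first i characters have been processed
def pvInv (l : List Char) (i : Int) (st : List (Int × Int) × Option Int) : Prop :=
  (∀ p ∈ st.1, pvMaxRun l p.1 p.2 ∧ p.2 < i) ∧
  (∀ s, st.2 = some s → 0 ≤ s ∧ s < i ∧ (∀ j, s ≤ j → j < i → pvW l j = true) ∧
     (s = 0 ∨ pvW l (s - 1) = false)) ∧
  (∀ s e, pvMaxRun l s e → s < i → ((e < i ∧ (s, e) ∈ st.1) ∨ (i ≤ e ∧ st.2 = some s))) ∧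
  (st.2 = none → i = 0 ∨ pvW l (i - 1) = false)

-- B's spans, as the term extract_symbol_at_position_py_alt builds them
def pvSpans (line : String) : List (Int × Int) :=
  match ((PySem.List.enumerate line.toList 0).foldl pvStep ([], none)).2 with
  | none => ((PySem.List.enumerate line.toList 0).foldl pvStep ([], none)).1
  | some s => ((PySem.List.enumerate line.toList 0).foldl pvStep ([], none)).1
      ++ [(s, (line.toList.length : Int))]

lemma pvScanL_spec (l : List Char) (s : Nat) :
    pvScanL l s ≤ s ∧ (∀ k : Nat, pvScanL l s ≤ k → k < s → pvW l (k : Int) = true) ∧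
    (pvScanL l s = 0 ∨ pvW l ((pvScanL l s : Int) - 1) = false) := by
  induction s with
  | zero => simp [pvScanL]
  | succ s ih =>
    by_cases h : pvW l (s : Int) = true
    · have hrw : pvScanL l (s + 1) = pvScanL l s := by
        simp only [pvScanL]; rw [if_pos]; exact h
      refine ⟨by omega, ?_, ?_⟩
      · intro k hk1 hk2
        rw [hrw] at hk1
        rcases Nat.lt_or_ge k s with hks | hks
        · exact ih.2.1 k hk1 hks
        · have : k = s := by omega
          subst this; exact h
      · rw [hrw]; exact ih.2.2
    · have hrw : pvScanL l (s + 1) = s + 1 := by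
        simp only [pvScanL]; rw [if_neg]; exact h
      refine ⟨le_of_eq hrw, ?_, ?_⟩
      · intro k hk1 hk2; rw [hrw] at hk1; omega
      · right; rw [hrw]
        have h1 : ((s + 1 : Nat) : Int) - 1 = (s : Int) := by push_cast; ring
        rw [h1]
        simpa using h

lemma pvScanR_spec (l : List Char) (rem : Nat) : ∀ e : Int,
    e ≤ pvScanR l rem e ∧ pvScanR l rem e ≤ e + rem ∧
    (∀ j : Int, e ≤ j → j < pvScanR l rem e → pvW l j = true) ∧
    (pvScanR l rem e = e + rem ∨ pvW l (pvScanR l rem e) = false) := by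
  induction rem with
  | zero =>
    intro e
    simp only [pvScanR]
    exact ⟨le_refl e, by omega, fun j h1 h2 => absurd h2 (by omega), Or.inl (by omega)⟩
  | succ r ih =>
    intro e
    by_cases h : pvW l e = true
    · have hrw : pvScanR l (r + 1) e = pvScanR l r (e + 1) := by
        simp only [pvScanR]; rw [if_pos]; exact h
      obtain ⟨h1, h2, h3, h4⟩ := ih (e + 1)
      refine ⟨by omega, by rw [hrw]; push_cast; omega, ?_, ?_⟩
      · intro j hj1 hj2
        rw [hrw] at hj2
        rcases lt_or_ge j (e + 1) with hj | hj
        · have : j = e := by omega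
          subst this; exact h
        · exact h3 j hj hj2
      · rw [hrw]
        rcases h4 with h4 | h4
        · left; rw [h4]; push_cast; ring
        · right; exact h4
    · have hrw : pvScanR l (r + 1) e = e := by
        simp only [pvScanR]; rw [if_neg]; exact h
      rw [hrw]
      exact ⟨le_refl e, by push_cast; omega, fun j hj1 hj2 => absurd hj2 (by omega),
        Or.inr (by simpa using h)⟩

lemma pvStep_inv (l : List Char) (i : Int) (st : List (Int × Int) × Option Int) (c : Char)
    (h0 : 0 ≤ i) (hc : PySem.List.pyGet? l i = some c) (hinv : pvInv l i st) :
    pvInv l (i + 1) (pvStep st (i, c)) := by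
  have hW : pvW l i = pvWord c := by simp [pvW, hc]
  have hlen : i < (l.length : Int) := by
    by_contra hcon
    have hnone : PySem.List.pyGet? l i = none := by
      rw [PySem.List.pyGet?_eq_none_iff]
      intro ⟨_, h2⟩; exact hcon h2
    rw [hc] at hnone; simp at hnone
  obtain ⟨acc, run⟩ := st
  obtain ⟨ha, hb, hcomp, hd⟩ := hinv
  by_cases hw : pvWord c = true
  · cases run with
    | none =>
      have hst : pvStep (acc, none) (i, c) = (acc, some i) := by
        simp [pvStep, hw]
      rw [hst]
      refine ⟨?_, ?_, ?_, ?_⟩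
      · intro p hp; obtain ⟨h1, h2⟩ := ha p hp; exact ⟨h1, by omega⟩
      · intro s hs
        simp only [Option.some.injEq] at hs
        subst hs
        refine ⟨h0, by omega, ?_, ?_⟩
        · intro j hj1 hj2
          have hji : j = i := by omega
          subst hji; rw [hW]; exact hw
        · exact hd rfl
      · intro s e hm hsi
        rcases lt_or_ge s i with hs | hs
        · rcases hcomp s e hm hs with ⟨h1, h2⟩ | ⟨h1, h2⟩
          · exact Or.inl ⟨by omega, h2⟩
          · exact absurd h2 (by simp)
        · have hsi' : s = i := by omega
          subst hsi'
          exact Or.inr ⟨by have := hm.2.1; omega, rfl⟩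
      · intro hcon; simp at hcon
    | some s0 =>
      have hst : pvStep (acc, some s0) (i, c) = (acc, some s0) := by
        simp [pvStep, hw]
      rw [hst]
      obtain ⟨hb1, hb2, hb3, hb4⟩ := hb s0 rfl
      refine ⟨?_, ?_, ?_, ?_⟩
      · intro p hp; obtain ⟨h1, h2⟩ := ha p hp; exact ⟨h1, by omega⟩
      · intro s hs
        simp only [Option.some.injEq] at hs
        subst hs
        refine ⟨hb1, by omega, ?_, hb4⟩
        intro j hj1 hj2
        rcases lt_or_ge j i with hj | hj
        · exact hb3 j hj1 hj
        · have hji : j = i := by omega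
          subst hji; rw [hW]; exact hw
      · intro s e hm hsi
        rcases lt_or_ge s i with hs | hs
        · rcases hcomp s e hm hs with ⟨h1, h2⟩ | ⟨h1, h2⟩
          · exact Or.inl ⟨by omega, h2⟩
          · -- the open run stays open: e cannot equal i since l[i] is a word char and e is maximal
            refine Or.inr ⟨?_, h2⟩
            rcases hm.2.2.2.2.2 with he | he
            · omega
            · by_contra hcon
              have hei : e = i := by omega
              rw [hei, hW, hw] at he; simp at he
        · -- a maximal run cannot start at i: the previous char is a word char (open run)
          exfalso
          have hsi' : s = i := by omega
          subst hsi'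
          rcases hm.2.2.2.2.1 with h' | h'
          · omega
          · have hwt : pvW l (s - 1) = true := by
              apply hb3 <;> omega
            rw [hwt] at h'; simp at h'
      · intro hcon; simp at hcon
  · have hwf : pvWord c = false := by simpa using hw
    cases run with
    | none =>
      have hst : pvStep (acc, none) (i, c) = (acc, none) := by
        simp [pvStep, hwf]
      rw [hst]
      refine ⟨?_, ?_, ?_, ?_⟩
      · intro p hp; obtain ⟨h1, h2⟩ := ha p hp; exact ⟨h1, by omega⟩
      · intro s hs; simp at hs
      · intro s e hm hsi
        rcases lt_or_ge s i with hs | hs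
        · rcases hcomp s e hm hs with ⟨h1, h2⟩ | ⟨h1, h2⟩
          · exact Or.inl ⟨by omega, h2⟩
          · exact absurd h2 (by simp)
        · exfalso
          have hsi' : s = i := by omega
          subst hsi'
          have hwt : pvW l s = true := hm.2.2.2.1 s (le_refl s) hm.2.1
          rw [hW, hwf] at hwt; simp at hwt
      · intro _; right
        have h1 : i + 1 - 1 = i := by ring
        rw [h1, hW]; exact hwf
    | some s0 =>
      have hst : pvStep (acc, some s0) (i, c) = (acc ++ [(s0, i)], none) := by
        simp [pvStep, hwf]
      rw [hst]
      obtain ⟨hb1, hb2, hb3, hb4⟩ := hb s0 rfl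
      have hmr : pvMaxRun l s0 i :=
        ⟨hb1, hb2, le_of_lt hlen, hb3, hb4, Or.inr (by rw [hW]; exact hwf)⟩
      refine ⟨?_, ?_, ?_, ?_⟩
      · intro p hp
        rcases List.mem_append.mp hp with hp | hp
        · obtain ⟨h1, h2⟩ := ha p hp; exact ⟨h1, by omega⟩
        · simp only [List.mem_singleton] at hp
          subst hp; exact ⟨hmr, by omega⟩
      · intro s hs; simp at hs
      · intro s e hm hsi
        rcases lt_or_ge s i with hs | hs
        · rcases hcomp s e hm hs with ⟨h1, h2⟩ | ⟨h1, h2⟩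
          · exact Or.inl ⟨by omega, List.mem_append_left _ h2⟩
          · simp only [Option.some.injEq] at h2
            subst h2
            have hei : e = i := by
              by_contra hcon
              have hwt : pvW l i = true := by
                apply hm.2.2.2.1 <;> omega
              rw [hW, hwf] at hwt; simp at hwt
            subst hei
            exact Or.inl ⟨by omega, List.mem_append_right _ (by simp)⟩
        · exfalso
          have hsi' : s = i := by omega
          subst hsi'
          have hwt : pvW l s = true := hm.2.2.2.1 s (le_refl s) hm.2.1
          rw [hW, hwf] at hwt; simp at hwt
      · intro _; right
        have h1 : i + 1 - 1 = i := by ring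
        rw [h1, hW]; exact hwf

lemma pvFold_inv (l : List Char) : ∀ (cs : List Char) (i : Int)
    (st : List (Int × Int) × Option Int), 0 ≤ i → cs = l.drop i.toNat → pvInv l i st →
    pvInv l (i + cs.length) ((PySem.List.enumerate cs i).foldl pvStep st) := by
  intro cs
  induction cs with
  | nil => intro i st h0 _ hinv; simpa [PySem.List.enumerate] using hinv
  | cons c rest ih =>
    intro i st h0 hdrop hinv
    have hget : PySem.List.pyGet? l i = some c := by
      rw [PySem.List.pyGet?_of_nonneg l h0]
      have h1 : l[i.toNat]? = (l.drop i.toNat)[0]? := by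
        simp [List.getElem?_drop]
      rw [h1, ← hdrop]; rfl
    have hrest : rest = l.drop (i + 1).toNat := by
      have h1 : (l.drop i.toNat).tail = l.drop (i.toNat + 1) := List.tail_drop
      have h2 : (i + 1).toNat = i.toNat + 1 := by omega
      rw [h2, ← h1, ← hdrop]; rfl
    have henum : PySem.List.enumerate (c :: rest) i
        = (i, c) :: PySem.List.enumerate rest (i + 1) := by
      simp [PySem.List.enumerate]
    rw [henum, List.foldl_cons]
    have hrec := ih (i + 1) (pvStep st (i, c)) (by omega) hrest
      (pvStep_inv l i st c h0 hget hinv)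
    have hlen : i + ((c :: rest).length : Int) = (i + 1) + (rest.length : Int) := by
      simp; ring
    rw [hlen]
    exact hrec

lemma pvFind?_eq_some_unique {α : Type} (p : α → Bool) :
    ∀ (xs : List α) (a : α), a ∈ xs → p a = true → (∀ b ∈ xs, p b = true → b = a) →
      xs.find? p = some a := by
  intro xs
  induction xs with
  | nil => intro a ha _ _; exact absurd ha (List.not_mem_nil)
  | cons x xs ih =>
    intro a ha hpa huniq
    by_cases hx : p x = true
    · have hxa : x = a := huniq x List.mem_cons_self hx
      subst hxa
      simp [List.find?, hx]
    · have hxa : x ≠ a := fun h => hx (h ▸ hpa)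
      have ha' : a ∈ xs := by
        rcases List.mem_cons.mp ha with h | h
        · exact absurd h.symm hxa
        · exact h
      rw [List.find?_cons_of_neg (by simpa using hx)]
      exact ih a ha' hpa (fun b hb => huniq b (List.mem_cons_of_mem _ hb))

lemma pvMaxRun_unique (l : List Char) {s e s' e' c : Int} (h1 : pvMaxRun l s e)
    (h2 : pvMaxRun l s' e') (hs : s ≤ c) (he : c ≤ e) (hs' : s' ≤ c) (he' : c ≤ e') :
    s = s' ∧ e = e' := by
  obtain ⟨h1a, h1b, h1c, h1d, h1e, h1f⟩ := h1
  obtain ⟨h2a, h2b, h2c, h2d, h2e, h2f⟩ := h2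
  have hss : s = s' := by
    rcases lt_trichotomy s s' with h | h | h
    · exfalso
      rcases h2e with h' | h'
      · omega
      · have hwt : pvW l (s' - 1) = true := by apply h1d <;> omega
        rw [hwt] at h'; simp at h'
    · exact h
    · exfalso
      rcases h1e with h' | h'
      · omega
      · have hwt : pvW l (s - 1) = true := by apply h2d <;> omega
        rw [hwt] at h'; simp at h'
  refine ⟨hss, ?_⟩
  rcases lt_trichotomy e e' with h | h | h
  · exfalso
    rcases h1f with h' | h'
    · omega
    · have hwt : pvW l e = true := by apply h2d <;> omega
      rw [hwt] at h'; simp at h'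
  · exact h
  · exfalso
    rcases h2f with h' | h'
    · omega
    · have hwt : pvW l e' = true := by apply h1d <;> omega
      rw [hwt] at h'; simp at h'

-- the two characterising properties of B's span list
lemma pvSpans_spec (line : String) :
    (∀ p ∈ pvSpans line, pvMaxRun line.toList p.1 p.2) ∧
    (∀ s e, pvMaxRun line.toList s e → (s, e) ∈ pvSpans line) := by
  set l := line.toList with hl
  have hinit : pvInv l 0 ([], none) := by
    refine ⟨?_, ?_, ?_, ?_⟩
    · intro p hp; exact absurd hp List.not_mem_nil
    · intro s hs; simp at hs
    · intro s e hm hsi; exfalso; have := hm.1; omega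
    · intro _; left; rfl
  have hinv := pvFold_inv l l 0 ([], none) (le_refl 0) (by simp) hinit
  rw [zero_add] at hinv
  obtain ⟨ha, hb, hcomp, _⟩ := hinv
  constructor
  · intro p hp
    unfold pvSpans at hp
    rcases hrun : ((PySem.List.enumerate l 0).foldl pvStep ([], none)).2 with _ | s0
    · rw [hrun] at hp
      exact (ha p hp).1
    · rw [hrun] at hp
      rcases List.mem_append.mp hp with hp | hp
      · exact (ha p hp).1
      · simp only [List.mem_singleton] at hp
        subst hp
        obtain ⟨hb1, hb2, hb3, hb4⟩ := hb s0 hrun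
        exact ⟨hb1, hb2, le_refl _, hb3, hb4, Or.inl rfl⟩
  · intro s e hm
    have hsl : s < (l.length : Int) := by
      have := hm.2.1; have := hm.2.2.1; omega
    unfold pvSpans
    rcases hcomp s e hm hsl with ⟨h1, h2⟩ | ⟨h1, h2⟩
    · rcases hrun : ((PySem.List.enumerate l 0).foldl pvStep ([], none)).2 with _ | s0
      · exact h2
      · exact List.mem_append_left _ h2
    · have he : e = (l.length : Int) := by
        have := hm.2.2.1; omega
      rw [h2]
      refine List.mem_append_right _ ?_
      have he' : e = ((line.toList.length : Nat) : Int) := by rw [← hl]; exact he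
      rw [he']
      exact List.mem_singleton.mpr rfl

-- B's result expressed through find? over pvSpans (definitional repackaging)
lemma pvAlt_eq (line : String) (column : Int) :
    extract_symbol_at_position_py_alt line column =
      match (pvSpans line).find? (fun p => decide (p.1 ≤ column ∧ column ≤ p.2)) with
      | some p => some (PySem.Str.slice line (some p.1) (some p.2))
      | none => none := rfl

-- A = B on every nonnegative column
lemma pvMainNonneg (line : String) (column : Int) (h0 : 0 ≤ column) :
    extract_symbol_at_position_py line column = extract_symbol_at_position_py_alt line column := by
  obtain ⟨hP1, hP2⟩ := pvSpans_spec line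
  rw [pvAlt_eq]
  by_cases hbig : column > (line.toList.length : Int)
  · have hfind : (pvSpans line).find? (fun p => decide (p.1 ≤ column ∧ column ≤ p.2)) = none := by
      rw [List.find?_eq_none]
      intro p hp
      have hmr := hP1 p hp
      simp only [decide_eq_true_eq]
      intro ⟨_, hc2⟩
      have := hmr.2.2.1; omega
    rw [hfind]
    simp only [extract_symbol_at_position_py]
    rw [if_pos hbig]
  · -- 0 ≤ column ≤ len
    have hSL := pvScanL_spec line.toList column.toNat
    have hSR := pvScanR_spec line.toList ((line.toList.length : Int) - column).toNat column
    set S : Int := ((pvScanL line.toList column.toNat : Nat) : Int) with hS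
    set E : Int := pvScanR line.toList ((line.toList.length : Int) - column).toNat column with hE
    have hcast : ((column.toNat : Nat) : Int) = column := Int.toNat_of_nonneg h0
    have hS0 : 0 ≤ S := by positivity
    have hSc : S ≤ column := by
      have := hSL.1; omega
    have hSint : ∀ j : Int, S ≤ j → j < column → pvW line.toList j = true := by
      intro j hj1 hj2
      have hj0 : 0 ≤ j := by omega
      have hjc : ((j.toNat : Nat) : Int) = j := Int.toNat_of_nonneg hj0
      rw [← hjc]
      apply hSL.2.1 <;> omega
    have hSb : S = 0 ∨ pvW line.toList (S - 1) = false := by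
      rcases hSL.2.2 with h | h
      · left; omega
      · right; exact h
    have hcE : column ≤ E := hSR.1
    have hEn : E ≤ (line.toList.length : Int) := by
      have := hSR.2.1; omega
    have hEint : ∀ j : Int, column ≤ j → j < E → pvW line.toList j = true := hSR.2.2.1
    have hEb : E = (line.toList.length : Int) ∨ pvW line.toList E = false := by
      rcases hSR.2.2.2 with h | h
      · left; omega
      · right; exact h
    by_cases hlt : S < E
    · -- A finds a word: (S, E) is the unique maximal run containing the column
      have hmr : pvMaxRun line.toList S E := by
        refine ⟨hS0, hlt, hEn, ?_, hSb, hEb⟩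
        intro j hj1 hj2
        rcases lt_or_ge j column with hj | hj
        · exact hSint j hj1 hj
        · exact hEint j hj hj2
      have hfind : (pvSpans line).find? (fun p => decide (p.1 ≤ column ∧ column ≤ p.2))
          = some (S, E) := by
        apply pvFind?_eq_some_unique
        · exact hP2 S E hmr
        · simp only [decide_eq_true_eq]; exact ⟨hSc, hcE⟩
        · intro b hb hpb
          simp only [decide_eq_true_eq] at hpb
          obtain ⟨he1, he2⟩ := pvMaxRun_unique line.toList (hP1 b hb) hmr hpb.1 hpb.2 hSc hcE
          exact Prod.ext he1 he2
      rw [hfind]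
      simp only [extract_symbol_at_position_py]
      rw [if_neg hbig, if_pos h0, ← hS, ← hE, if_pos hlt]
    · -- no word at the column: A returns none and no span touches the column
      have hSE : S = column ∧ E = column := by omega
      have hfind : (pvSpans line).find? (fun p => decide (p.1 ≤ column ∧ column ≤ p.2)) = none := by
        rw [List.find?_eq_none]
        intro p hp
        have hmr := hP1 p hp
        simp only [decide_eq_true_eq]
        intro ⟨hc1, hc2⟩
        obtain ⟨hm1, hm2, hm3, hm4, hm5, hm6⟩ := hmr
        rcases lt_or_eq_of_le hc2 with hcase | hcase
        · -- column < p.2 : the char at the column is a word char, contradicting E = column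
          have hwt : pvW line.toList column = true := hm4 column hc1 hcase
          rcases hEb with h | h
          · omega
          · rw [hSE.2] at h; rw [hwt] at h; simp at h
        · -- column = p.2 : the char before the column is a word char, contradicting S = column
          have hwt : pvW line.toList (column - 1) = true := by
            apply hm4 <;> omega
          rcases hSb with h | h
          · omega
          · rw [hSE.1] at h; rw [hwt] at h; simp at h
      rw [hfind]
      simp only [extract_symbol_at_position_py]
      rw [if_neg hbig, if_pos h0, ← hS, ← hE, if_neg hlt]

-- A = B on the whole precondition outside D_
lemma pvMain (line : String) (column : Int)
    (hpre : -(line.toList.length : Int) ≤ column)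
    (hnd : ¬ (column < 0 ∧ ((PySem.List.pyGet? line.toList column).any pvWord) = true)) :
    extract_symbol_at_position_py line column = extract_symbol_at_position_py_alt line column := by
  rcases lt_or_ge column 0 with h0 | h0
  case inr => exact pvMainNonneg line column h0
  case inl =>
    obtain ⟨hP1, _⟩ := pvSpans_spec line
    have hwf : pvW line.toList column = false := by
      by_contra h
      exact hnd ⟨h0, by simpa [pvW] using h⟩
    rw [pvAlt_eq]
    have hfind : (pvSpans line).find? (fun p => decide (p.1 ≤ column ∧ column ≤ p.2)) = none := by
      rw [List.find?_eq_none]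
      intro p hp
      have hmr := hP1 p hp
      simp only [decide_eq_true_eq]
      intro ⟨hc1, _⟩
      have := hmr.1; omega
    rw [hfind]
    simp only [extract_symbol_at_position_py]
    rw [if_neg (by omega : ¬ column > (line.toList.length : Int)),
      if_neg (by omega : ¬ 0 ≤ column)]
    rcases hrem : ((line.toList.length : Int) - column).toNat with _ | r
    · exfalso; omega
    · have hscan : pvScanR line.toList (r + 1) column = column := by
        simp only [pvScanR]
        rw [if_neg]
        simp only [pvW] at hwf
        simp [hwf]
      rw [hscan]
      simp

-- ===== VERDICT (by name: the statement is the Claim_ definition above) =====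
theorem extract_symbol_at_position_py_spec : Claim_unchanged_extract_symbol_at_position_py := by
  intro line column _ hpre hnd
  show extract_symbol_at_position_py line column = extract_symbol_at_position_py_alt line column
  exact pvMain line column hpre (fun h => hnd h)

theorem extract_symbol_at_position_py_changed : Claim_changed_extract_symbol_at_position_py := by
  unfold Claim_changed_extract_symbol_at_position_py; decide

theorem extract_symbol_at_position_py_tight : Claim_exact_extract_symbol_at_position_py := by
  intro line column _ hpre hD
  obtain ⟨hcol, hword⟩ := hD
  obtain ⟨hP1, _⟩ := pvSpans_spec line
  have halt : extract_symbol_at_position_py_alt line column = none := by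
    rw [pvAlt_eq]
    have hfind : (pvSpans line).find? (fun p => decide (p.1 ≤ column ∧ column ≤ p.2)) = none := by
      rw [List.find?_eq_none]
      intro p hp
      have hmr := hP1 p hp
      simp only [decide_eq_true_eq]
      intro ⟨hc1, _⟩
      have := hmr.1; omega
    rw [hfind]
  rw [halt]
  have hpre' : -((line.toList.length : Int)) ≤ column := hpre
  simp only [extract_symbol_at_position_py]
  rw [if_neg (by omega : ¬ column > (line.toList.length : Int)),
    if_neg (by omega : ¬ 0 ≤ column)]
  rcases hrem : ((line.toList.length : Int) - column).toNat with _ | r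
  · exfalso; omega
  · have hscan : pvScanR line.toList (r + 1) column = pvScanR line.toList r (column + 1) := by
      simp only [pvScanR]
      rw [if_pos]
      exact hword
    rw [hscan]
    have hge := (pvScanR_spec line.toList r (column + 1)).1
    rw [if_pos (by omega : column < pvScanR line.toList r (column + 1))]
    simp
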